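-- pv_equiv track=rewrite | github.com/PatrickPinace/tennis-club | apps/tournaments/views.py | _generate_seed_to_slot_map
-- ===== SOURCE A (Python) =====
-- PREDEFINED_SEEDING_ORDERS = {
--     2: [1, 2],
--     4: [1, 4, 3, 2],
--     8: [1, 8, 5, 4, 3, 6, 7, 2],
--     16: [1, 16, 9, 8, 5, 12, 13, 4, 3, 14, 11, 6, 7, 10, 15, 2],
--     32: [1, 32, 17, 16, 9, 24, 25, 8, 5, 28, 21, 12, 13, 20, 29, 4, 3, 30, 19, 14, 11, 22, 27, 6, 7, 26, 23, 10, 15, 18, 31, 2]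
-- }
--
-- def _generate_seed_to_slot_map(bracket_size):
--     """
--     Generuje mapowanie numeru rozstawienia (1-indeksowany) na indeks slotu w drabince (0-indeksowany)
--     zgodnie ze standardowym schematem rozstawiania w profesjonalnym tenisie.
--     """
--     if bracket_size == 0:
--         return {}
--     if bracket_size == 1:
--         return {1: 0}
--
--     # Krok 1: Spróbuj użyć predefiniowanego schematu rozstawienia
--     if bracket_size in PREDEFINED_SEEDING_ORDERS:
--         slots = PREDEFINED_SEEDING_ORDERS[bracket_size]
--     else:
--         # Krok 2: Jeśli schemat nie jest zdefiniowany, oblicz go dynamicznie (fallback)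
--         # Inicjalizacja: Zaczynamy od drabinki dla 2 graczy
--         slots = [1, 2]
--
--         # Iteracyjnie podwajamy rozmiar drabinki, aż osiągniemy docelowy rozmiar.
--         while len(slots) < bracket_size:
--             new_slots = []
--             # Dla każdego numeru rozstawienia w obecnej drabince, dodajemy go
--             # oraz jego "lustrzane" odbicie w nowej, większej drabince.
--             for seed in slots:
--                 new_slots.append(seed)
--                 new_slots.append(len(slots) * 2 + 1 - seed)
--             slots = new_slots
--
--     # Tworzymy słownik mapujący numer rozstawienia na pozycję w drabince
--     # Przykład dla 8: [1, 8, 5, 4, 3, 6, 7, 2]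
--     # Przykład dla 16: [1, 16, 9, 8, 5, 12, 13, 4, 3, 14, 11, 6, 7, 10, 15, 2]
--     return {seed: index for index, seed in enumerate(slots)}
-- ===== SOURCE B (Python) =====
-- PREDEFINED_SEEDING_ORDERS = {
--     2: [1, 2],
--     4: [1, 4, 3, 2],
--     8: [1, 8, 5, 4, 3, 6, 7, 2],
--     16: [1, 16, 9, 8, 5, 12, 13, 4, 3, 14, 11, 6, 7, 10, 15, 2],
--     32: [1, 32, 17, 16, 9, 24, 25, 8, 5, 28, 21, 12, 13, 20, 29, 4, 3, 30, 19, 14, 11, 22, 27, 6, 7, 26, 23, 10, 15, 18, 31, 2]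
-- }
--
--
-- def _build_order(target):
--     # Smallest doubling-generated bracket of length >= max(target, 2),
--     # built top-down by divide and conquer instead of bottom-up doubling.
--     if target <= 2:
--         return [1, 2]
--     half = _build_order((target + 1) // 2)
--     n = 2 * len(half)
--     return [x for s in half for x in (s, n + 1 - s)]
--
--
-- def _generate_seed_to_slot_map(bracket_size):
--     if bracket_size == 0:
--         return {}
--     if bracket_size == 1:
--         return {1: 0}
--     slots = PREDEFINED_SEEDING_ORDERS.get(bracket_size)
--     if slots is None:
--         slots = _build_order(bracket_size)
--     return {seed: index for index, seed in enumerate(slots)}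
-- ===== Notes on version B (the rewrite author's own statement) =====
-- stated objective: alternative
-- what changed: The fallback bottom-up doubling while-loop is replaced by a top-down divide-and-conquer recursion that halves the target (ceil) down to the base bracket [1,2] and interleaves each seed with its mirror on the way back up; the 0/1 guards, predefined table and final dict comprehension stay.
import Mathlib
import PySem

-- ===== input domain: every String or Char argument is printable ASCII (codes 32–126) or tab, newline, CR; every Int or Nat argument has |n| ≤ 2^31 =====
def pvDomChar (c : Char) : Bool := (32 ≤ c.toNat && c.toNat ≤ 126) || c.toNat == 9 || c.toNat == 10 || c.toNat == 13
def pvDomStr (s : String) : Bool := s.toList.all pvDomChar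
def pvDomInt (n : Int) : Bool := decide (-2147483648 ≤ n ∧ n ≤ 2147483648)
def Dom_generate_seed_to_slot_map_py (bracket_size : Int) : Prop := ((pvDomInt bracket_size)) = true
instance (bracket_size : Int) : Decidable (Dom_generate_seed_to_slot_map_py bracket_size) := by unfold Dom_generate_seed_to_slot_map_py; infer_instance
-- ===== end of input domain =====

-- B replaces only the fallback bottom-up doubling loop by a top-down divide-and-conquer
-- recursion on the target size (alternative decomposition, same cost); guards, table and
-- final dict comprehension are unchanged.


-- ===== PORT A =====
def pvPredefined : PySem.Dict Int (List Int) := PySem.Dict.ofList [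
  (2, [1, 2]),
  (4, [1, 4, 3, 2]),
  (8, [1, 8, 5, 4, 3, 6, 7, 2]),
  (16, [1, 16, 9, 8, 5, 12, 13, 4, 3, 14, 11, 6, 7, 10, 15, 2]),
  (32, [1, 32, 17, 16, 9, 24, 25, 8, 5, 28, 21, 12, 13, 20, 29, 4, 3, 30, 19, 14, 11, 22, 27, 6, 7, 26, 23, 10, 15, 18, 31, 2])]

-- loop-shape helpers, stated first because pvALoop's termination proof cites them
theorem pvFoldl_interleave (c : Int) (l acc : List Int) :
    l.foldl (fun ns s => (ns ++ [s]) ++ [c - s]) acc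
      = acc ++ l.flatMap (fun s => [s, c - s]) := by
  induction l generalizing acc with
  | nil => simp
  | cons x xs ih =>
    rw [List.foldl_cons, ih, List.flatMap_cons]
    simp

theorem pvInterleave_length (c : Int) (l : List Int) :
    (l.flatMap (fun s => [s, c - s])).length = 2 * l.length := by
  induction l with
  | nil => simp
  | cons x xs ih => rw [List.flatMap_cons, List.length_append, ih]; simp only [List.length_cons, List.length_nil]; omega

-- the big while-loop of A: repeatedly double `slots` until its length reaches bracket_size.
-- pvAStep is the loop body (build new_slots by the inner for-loop); the `0 < slots.length`
-- conjunct only makes the recursion total: it is True at the single call site (slots = [1,2])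
-- and on every iterate.
def pvAStep (slots : List Int) : List Int :=
  slots.foldl (fun new_slots seed =>
    (new_slots ++ [seed]) ++ [(slots.length : Int) * 2 + 1 - seed]) []

theorem pvAStep_length (slots : List Int) : (pvAStep slots).length = 2 * slots.length := by
  unfold pvAStep
  rw [pvFoldl_interleave, List.nil_append, pvInterleave_length]

def pvALoop (bracket_size : Int) (slots : List Int) : List Int :=
  if _h : (slots.length : Int) < bracket_size ∧ 0 < slots.length then
    pvALoop bracket_size (pvAStep slots)
  else slots
termination_by (bracket_size - slots.length).toNat
decreasing_by
  rw [pvAStep_length]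
  omega

-- dict comprehension {seed: index for index, seed in enumerate(slots)}, returned as items
def pvEnumDict (slots : List Int) : List (Int × Int) :=
  ((PySem.List.enumerate slots 0).foldl
    (fun d p => PySem.Dict.insert d p.2 p.1) PySem.Dict.empty).items

def generate_seed_to_slot_map_py (bracket_size : Int) : List (Int × Int) :=
  if bracket_size = 0 then []
  else if bracket_size = 1 then [(1, 0)]
  else
    let slots :=
      match PySem.Dict.get? pvPredefined bracket_size with
      | some s => s
      | none => pvALoop bracket_size [1, 2]
    pvEnumDict slots

-- ===== PORT B =====
-- divide-and-conquer builder of Source B (_build_order)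
def pvBuildOrder (target : Int) : List Int :=
  if target ≤ 2 then [1, 2]
  else
    let half := pvBuildOrder (PySem.Int.floordiv (target + 1) 2)
    let n : Int := 2 * half.length
    half.flatMap (fun s => [s, n + 1 - s])
termination_by target.toNat
decreasing_by
  have : PySem.Int.floordiv (target + 1) 2 = (target + 1) / 2 :=
    PySem.Int.floordiv_eq_ediv_of_pos (by omega)
  simp only [this]
  omega

def generate_seed_to_slot_map_py_alt (bracket_size : Int) : List (Int × Int) :=
  if bracket_size = 0 then []
  else if bracket_size = 1 then [(1, 0)]
  else
    let slots :=
      match PySem.Dict.get? pvPredefined bracket_size with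
      | some s => s
      | none => pvBuildOrder bracket_size
    pvEnumDict slots

-- ===== PRECONDITION & SPEC =====
def Spec_generate_seed_to_slot_map_py (bracket_size : Int) (out : List (Int × Int)) : Prop := out = generate_seed_to_slot_map_py_alt bracket_size
instance (bracket_size : Int) (out : List (Int × Int)) : Decidable (Spec_generate_seed_to_slot_map_py bracket_size out) := by unfold Spec_generate_seed_to_slot_map_py; infer_instance

-- ===== CLAIM (what is proved, stated in full; the proofs are below) =====
def Claim_equal_generate_seed_to_slot_map_py : Prop := ∀ (bracket_size : Int), Dom_generate_seed_to_slot_map_py bracket_size → Spec_generate_seed_to_slot_map_py bracket_size (generate_seed_to_slot_map_py bracket_size)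

-- ===== LEMMAS AND PROOFS =====

-- one doubling step, in the shape B uses
def pvDouble (l : List Int) : List Int :=
  l.flatMap (fun s => [s, 2 * (l.length : Int) + 1 - s])

theorem pvAStep_eq_double (l : List Int) : pvAStep l = pvDouble l := by
  unfold pvAStep pvDouble
  rw [pvFoldl_interleave, List.nil_append]
  have hc : (l.length : Int) * 2 + 1 = 2 * (l.length : Int) + 1 := by ring
  rw [hc]

theorem pvDouble_length (l : List Int) : (pvDouble l).length = 2 * l.length := by
  unfold pvDouble
  exact pvInterleave_length _ l

-- the core commuting fact: for 2 < b, running A's loop to target b is one doubling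
-- after running it to target ⌈b/2⌉
theorem pvALoop_halve (b : Int) (slots : List Int)
    (hb : 2 < b) (h0 : 0 < slots.length) (hlt : (slots.length : Int) < b) :
    pvALoop b slots = pvDouble (pvALoop ((b + 1) / 2) slots) := by
  have hc2 : 2 * ((b + 1) / 2) ≥ b := by omega
  by_cases hlc : (slots.length : Int) < (b + 1) / 2
  · -- both loops step
    rw [pvALoop.eq_def, dif_pos ⟨hlt, h0⟩, pvAStep_eq_double]
    conv_rhs => rw [pvALoop.eq_def, dif_pos ⟨hlc, h0⟩, pvAStep_eq_double]
    have hdl : ((pvDouble slots).length : Int) = 2 * slots.length := by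
      rw [pvDouble_length]; push_cast; ring
    have h2lt : ((pvDouble slots).length : Int) < b := by
      rw [hdl]; omega
    exact pvALoop_halve b (pvDouble slots) hb (by rw [pvDouble_length]; omega) h2lt
  · -- inner loop already done; outer loop does exactly one more step
    have hstop : pvALoop ((b + 1) / 2) slots = slots := by
      rw [pvALoop.eq_def, dif_neg]; intro h; exact hlc h.1
    rw [hstop]
    rw [pvALoop.eq_def, dif_pos ⟨hlt, h0⟩, pvAStep_eq_double]
    rw [pvALoop.eq_def, dif_neg]
    intro h
    have hdl : ((pvDouble slots).length : Int) = 2 * slots.length := by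
      rw [pvDouble_length]; push_cast; ring
    have := h.1
    rw [hdl] at this
    omega
termination_by (b - slots.length).toNat
decreasing_by
  rw [pvDouble_length]
  omega

theorem pvALoop_eq_build (b : Int) : pvALoop b [1, 2] = pvBuildOrder b := by
  by_cases hb : b ≤ 2
  · rw [pvALoop.eq_def, dif_neg (by simp; omega), pvBuildOrder, if_pos hb]
  · have hfd : PySem.Int.floordiv (b + 1) 2 = (b + 1) / 2 :=
      PySem.Int.floordiv_eq_ediv_of_pos (by omega)
    rw [pvBuildOrder.eq_def, if_neg hb, hfd]
    rw [pvALoop_halve b [1, 2] (by omega) (by simp) (by simp; omega)]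
    rw [pvALoop_eq_build ((b + 1) / 2)]
    unfold pvDouble
    rfl
termination_by b.toNat
decreasing_by omega

-- ===== VERDICT (by name: the statement is the Claim_ definition above) =====
theorem generate_seed_to_slot_map_py_spec : Claim_equal_generate_seed_to_slot_map_py := by
  intro b _
  unfold Spec_generate_seed_to_slot_map_py generate_seed_to_slot_map_py generate_seed_to_slot_map_py_alt
  split_ifs
  · rfl
  · rfl
  · cases h : PySem.Dict.get? pvPredefined b with
    | some s => rfl
    | none => exact congrArg pvEnumDict (pvALoop_eq_build b)
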